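-- pv_equiv track=rewrite | github.com/amoorkie/ai-skills | src/ai_skills_toolkit/skills/figma_ui_architect/skill.py | _count_open_questions
-- ===== SOURCE A (Python) =====
-- def _count_open_questions(markdown: str) -> int:
--     in_section = False
--     count = 0
--     for line in markdown.splitlines():
--         if line == "## Open Questions":
--             in_section = True
--             continue
--         if in_section and line.startswith("## "):
--             break
--         if in_section and line.startswith("- "):
--             count += 1
--     return count
-- ===== SOURCE B (Python) =====
-- def _count_open_questions(markdown: str) -> int:
--     lines = markdown.splitlines()
--     try:
--         start = lines.index("## Open Questions") + 1
--     except ValueError: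
--         return 0
--     tail = lines[start:]
--     end = next((j for j, line in enumerate(tail) if line.startswith("## ")), len(tail))
--     return sum(1 for line in tail[:end] if line.startswith("- "))
-- ===== Notes on version B (the rewrite author's own statement) =====
-- stated objective: alternative
-- what changed: Replaced the interleaved state-flag loop by two separate phases: list.index locates the '## Open Questions' header, a slice up to the next '## ' line extracts the section, and the bullets are counted in that slice.
-- outside the precondition, e.g. on _count_open_questions('## Open Questions\n- a\n## Open Questions\n- b'): A returns 2, B returns 1
import Mathlib
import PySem

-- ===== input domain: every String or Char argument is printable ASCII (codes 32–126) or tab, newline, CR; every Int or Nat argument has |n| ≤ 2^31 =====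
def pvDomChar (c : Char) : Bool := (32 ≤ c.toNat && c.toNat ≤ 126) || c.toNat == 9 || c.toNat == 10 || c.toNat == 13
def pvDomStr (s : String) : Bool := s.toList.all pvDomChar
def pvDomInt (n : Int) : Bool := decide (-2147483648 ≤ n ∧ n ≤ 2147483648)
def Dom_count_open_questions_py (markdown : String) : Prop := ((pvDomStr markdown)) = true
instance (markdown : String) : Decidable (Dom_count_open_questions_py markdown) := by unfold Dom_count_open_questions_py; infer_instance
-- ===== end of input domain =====

-- B splits A's interleaved state-flag loop into two phases (locate the header with index?, then
-- count bullets in the sliced section); structurally different, same cost (objective: alternative).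


-- ===== PORT A =====
-- A's for-loop with its in_section flag, count accumulator and break, step for step.
def cqA_loop : List String → Bool → Int → Int
  | [], _, count => count
  | line :: rest, in_section, count =>
    if line = "## Open Questions" then cqA_loop rest true count
    else if in_section && PySem.Str.startswith line "## " then count
    else if in_section && PySem.Str.startswith line "- " then cqA_loop rest in_section (count + 1)
    else cqA_loop rest in_section count

def count_open_questions_py (markdown : String) : Int :=
  cqA_loop (PySem.Str.splitlines markdown) false 0

-- ===== PORT B =====
def count_open_questions_py_alt (markdown : String) : Int :=
  let lines := PySem.Str.splitlines markdown
  match PySem.List.index? lines "## Open Questions" with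
  | none => 0
  | some start =>
    let tail := lines.drop (start + 1)
    let sec := tail.take (tail.findIdx (fun line => PySem.Str.startswith line "## "))
    sec.foldl (fun c line => if PySem.Str.startswith line "- " then c + 1 else c) 0

-- ===== PRECONDITION & SPEC =====
-- Pre_ excludes inputs whose splitlines contain the exact header line "## Open Questions" more than
-- once: there A's sticky flag counts past the repeated header while B stops the section at any
-- "## " line — a duplicate-header corner on which either reading is defensible.
def Pre_count_open_questions_py (markdown : String) : Prop :=
  PySem.List.count (PySem.Str.splitlines markdown) "## Open Questions" ≤ 1
instance (markdown : String) : Decidable (Pre_count_open_questions_py markdown) := by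
  unfold Pre_count_open_questions_py; infer_instance

def pvWitness_count_open_questions_py : String := "## Open Questions\n- a\n- b\n## Next\n- c"

def Spec_count_open_questions_py (markdown : String) (out : Int) : Prop := out = count_open_questions_py_alt markdown
instance (markdown : String) (out : Int) : Decidable (Spec_count_open_questions_py markdown out) := by unfold Spec_count_open_questions_py; infer_instance

-- ===== CLAIM (what is proved, stated in full; the proofs are below) =====
def Claim_equal_count_open_questions_py : Prop := ∀ (markdown : String), Dom_count_open_questions_py markdown → Pre_count_open_questions_py markdown → Spec_count_open_questions_py markdown (count_open_questions_py markdown)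

-- ===== LEMMAS AND PROOFS =====

-- inside the section, with no further header line, A's loop adds the bullet count of the block up
-- to the first "## " line
theorem cqA_loop_in_section (rest : List String) (c : Int)
    (h : "## Open Questions" ∉ rest) :
    cqA_loop rest true c =
      c + (((rest.take (rest.findIdx (fun line => PySem.Str.startswith line "## "))).countP
              (fun line => PySem.Str.startswith line "- ") : Nat) : Int) := by
  induction rest generalizing c with
  | nil => simp [cqA_loop]
  | cons l rest ih =>
    have hl : l ≠ "## Open Questions" := by intro h'; exact h (h' ▸ List.mem_cons_self ..)
    have hrest : "## Open Questions" ∉ rest := fun h' => h (List.mem_cons_of_mem _ h')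
    by_cases hp : PySem.Chars.startswith l.toList ['#', '#', ' '] = true
    · simp [cqA_loop, hl, List.findIdx_cons, hp]
    · by_cases hq : PySem.Chars.startswith l.toList ['-', ' '] = true
      · rw [show cqA_loop (l :: rest) true c = cqA_loop rest true (c + 1) by
          simp [cqA_loop, hl, hp, hq]]
        rw [ih _ hrest]
        simp [List.findIdx_cons, hp, hq]
        omega
      · rw [show cqA_loop (l :: rest) true c = cqA_loop rest true c by
          simp [cqA_loop, hl, hp, hq]]
        rw [ih _ hrest]
        simp [List.findIdx_cons, hp, hq]

-- the body of B, on a list of lines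
def cqB_body (lines : List String) : Int :=
  match PySem.List.index? lines "## Open Questions" with
  | none => 0
  | some start =>
    let tail := lines.drop (start + 1)
    let sec := tail.take (tail.findIdx (fun line => PySem.Str.startswith line "## "))
    sec.foldl (fun c line => if PySem.Str.startswith line "- " then c + 1 else c) 0

theorem cqA_eq_cqB (lines : List String)
    (hpre : PySem.List.count lines "## Open Questions" ≤ 1) :
    cqA_loop lines false 0 = cqB_body lines := by
  induction lines with
  | nil => simp [cqA_loop, cqB_body, PySem.List.index?]
  | cons l rest ih =>
    by_cases hl : l = "## Open Questions"
    · subst hl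
      have hcount : PySem.List.count rest "## Open Questions" = 0 := by
        simp [PySem.List.count_eq, List.count_cons_self] at hpre ⊢
        omega
      have hnot : "## Open Questions" ∉ rest := by
        simpa [PySem.List.count_eq, List.count_eq_zero] using hcount
      rw [show cqA_loop ("## Open Questions" :: rest) false 0 = cqA_loop rest true 0 by
        simp [cqA_loop]]
      rw [cqA_loop_in_section rest 0 hnot]
      simp only [cqB_body, PySem.List.index?_cons_self]
      rw [PySem.List.foldl_if_add_one]
      simp
    · have hstep : cqA_loop (l :: rest) false 0 = cqA_loop rest false 0 := by
        simp [cqA_loop, hl]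
      have hpre' : PySem.List.count rest "## Open Questions" ≤ 1 := by
        simp [PySem.List.count_eq, List.count_cons] at hpre ⊢
        omega
      rw [hstep, ih hpre']
      rw [show cqB_body (l :: rest) = cqB_body rest from ?_]
      unfold cqB_body
      rw [PySem.List.index?_cons_of_ne rest hl]
      cases hidx : PySem.List.index? rest "## Open Questions" with
      | none =>
        have : "## Open Questions" ∉ rest := (PySem.List.index?_eq_none_iff rest _).mp hidx
        simp
      | some i => simp [List.drop_succ_cons]

-- ===== VERDICT (by name: the statement is the Claim_ definition above) =====
theorem count_open_questions_py_spec : Claim_equal_count_open_questions_py := by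
  intro markdown _ hpre
  unfold Spec_count_open_questions_py count_open_questions_py count_open_questions_py_alt
  exact cqA_eq_cqB _ hpre
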